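-- pv_equiv track=rewrite | github.com/JANENAMMMM/Python-day4-HW | 모의고사_1.py | solution
-- ===== SOURCE A (Python) =====
-- def solution(answers):
--     import itertools
--     inf_m1=iter(itertools.cycle([1,2,3,4,5]))
--     inf_m2=iter(itertools.cycle([2,1,2,3,2,4,2,5]))
--     inf_m3=iter(itertools.cycle([3,3,1,1,2,2,4,4,5,5]))
--     inf_answers=iter(answers)
--     scores=[0,0,0]
--     for i in range(len(answers)):
--         value=next(inf_answers)
--         if value==next(inf_m1):
--             scores[0]+=1
--         if value==next(inf_m2):
--             scores[1]+=1
--         if value==next(inf_m3):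
--             scores[2]+=1
--     if max(scores)==scores[0]==scores[1]==scores[2]:
--         return([1,2,3])
--     elif max(scores)==scores[0]==scores[1]:
--         return([1,2])
--     elif max(scores)==scores[0]==scores[2]:
--         return([1,3])
--     elif max(scores)==scores[1]==scores[2]:
--         return([2,3])
--     elif max(scores)==scores[0]:
--         return([1])
--     elif max(scores)==scores[1]:
--         return([2])
--     elif max(scores)==scores[2]:
--         return([3])
-- ===== SOURCE B (Python) =====
-- def solution(answers):
--     patterns = [[1, 2, 3, 4, 5],
--                 [2, 1, 2, 3, 2, 4, 2, 5],
--                 [3, 3, 1, 1, 2, 2, 4, 4, 5, 5]]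
--
--     def score(p):
--         # walk the answers in pattern-sized chunks, matching each chunk
--         # element-wise against the pattern itself (no modular indexing)
--         L = len(p)
--         return sum(a == b
--                    for k in range(0, len(answers), L)
--                    for a, b in zip(answers[k:k + L], p))
--
--     scores = [score(p) for p in patterns]
--     m = max(scores)
--     return [i + 1 for i, s in enumerate(scores) if s == m]
-- ===== Notes on version B (the rewrite author's own statement) =====
-- stated objective: alternative
-- what changed: B walks the answers in pattern-length chunks, zipping each slice element-wise against the pattern itself (no per-element modular/cyclic indexing and no triple-counter loop), then replaces A's 7-branch subset-enumeration if/elif chain with a uniform max-and-filter over the score list.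
import Mathlib
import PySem

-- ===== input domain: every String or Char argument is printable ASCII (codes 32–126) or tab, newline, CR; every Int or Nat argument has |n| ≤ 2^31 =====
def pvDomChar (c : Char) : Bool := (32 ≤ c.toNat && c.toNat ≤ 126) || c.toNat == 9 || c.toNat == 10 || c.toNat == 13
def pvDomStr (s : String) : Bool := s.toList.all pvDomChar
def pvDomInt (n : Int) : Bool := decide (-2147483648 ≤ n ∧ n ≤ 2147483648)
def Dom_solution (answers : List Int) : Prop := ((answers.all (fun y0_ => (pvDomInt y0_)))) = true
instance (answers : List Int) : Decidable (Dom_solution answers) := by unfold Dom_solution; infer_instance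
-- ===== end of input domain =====

-- B scores by chunking the answers into pattern-sized slices zipped against the
-- pattern (instead of A's cyclic per-element indexing with three counters), and
-- returns the winners by max-and-filter instead of A's 7-branch if/elif chain.

-- ===== PORT A =====
-- itertools.cycle of a finite literal list = indexing the list at i % len (exact).
def pvPat1 : List Int := [1, 2, 3, 4, 5]
def pvPat2 : List Int := [2, 1, 2, 3, 2, 4, 2, 5]
def pvPat3 : List Int := [3, 3, 1, 1, 2, 2, 4, 4, 5, 5]

def solution (answers : List Int) : List Int :=
  -- for i in range(len(answers)): value = next(inf_answers); three independent ifs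
  let scores : Int × Int × Int :=
    (PySem.List.enumerate answers).foldl
      (fun (s : Int × Int × Int) (q : Int × Int) =>
        let s1 := if q.2 = PySem.List.pyGetD pvPat1 (PySem.Int.mod q.1 5) 0 then s.1 + 1 else s.1
        let s2 := if q.2 = PySem.List.pyGetD pvPat2 (PySem.Int.mod q.1 8) 0 then s.2.1 + 1 else s.2.1
        let s3 := if q.2 = PySem.List.pyGetD pvPat3 (PySem.Int.mod q.1 10) 0 then s.2.2 + 1 else s.2.2
        (s1, s2, s3))
      (0, 0, 0)
  -- max(scores) of the 3-element list
  let m : Int := max scores.1 (max scores.2.1 scores.2.2)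
  if m = scores.1 ∧ scores.1 = scores.2.1 ∧ scores.2.1 = scores.2.2 then [1, 2, 3]
  else if m = scores.1 ∧ scores.1 = scores.2.1 then [1, 2]
  else if m = scores.1 ∧ scores.1 = scores.2.2 then [1, 3]
  else if m = scores.2.1 ∧ scores.2.1 = scores.2.2 then [2, 3]
  else if m = scores.1 then [1]
  else if m = scores.2.1 then [2]
  else if m = scores.2.2 then [3]
  else []  -- Python falls off and returns None here; unreachable since m is one of the scores

-- ===== PORT B =====
-- sum(a == b for k in range(0, len(answers), L) for a, b in zip(answers[k:k+L], p))
def pvScore (answers : List Int) (p : List Int) : Int :=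
  (PySem.List.pyRange 0 (answers.length : Int) (p.length : Int)).foldl
    (fun acc k =>
      ((PySem.List.slice answers (some k) (some (k + (p.length : Int)))).zip p).foldl
        (fun a (q : Int × Int) => a + (if q.1 = q.2 then (1 : Int) else 0)) acc)
    0

def solution_alt (answers : List Int) : List Int :=
  let patterns : List (List Int) :=
    [[1, 2, 3, 4, 5], [2, 1, 2, 3, 2, 4, 2, 5], [3, 3, 1, 1, 2, 2, 4, 4, 5, 5]]
  let scores : List Int := patterns.map (pvScore answers)
  let m : Int := (PySem.List.max? scores (fun x => x)).getD 0
  ((PySem.List.enumerate scores).filter (fun q => q.2 = m)).map (fun q => q.1 + 1)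

-- ===== PRECONDITION & SPEC =====
def Spec_solution (answers : List Int) (out : List Int) : Prop := out = solution_alt answers
instance (answers : List Int) (out : List Int) : Decidable (Spec_solution answers out) := by unfold Spec_solution; infer_instance

-- ===== CLAIM (what is proved, stated in full; the proofs are below) =====
def Claim_equal_solution : Prop := ∀ (answers : List Int), Dom_solution answers → Spec_solution answers (solution answers)

-- ===== LEMMAS AND PROOFS =====

-- the per-position match indicator used by A's cyclic indexing
def pvG (p : List Int) (q : Int × Int) : Int :=
  if q.2 = PySem.List.pyGetD p (PySem.Int.mod q.1 (p.length : Int)) 0 then 1 else 0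

-- the common mathematical form of both scoring strategies
def pvMSum (p : List Int) : List Int → Nat → Int
  | [], _ => 0
  | x :: t, k => pvG p ((k : Int), x) + pvMSum p t (k + 1)

-- the per-chunk match count used by B
def pvInner (c p : List Int) : Int :=
  ((c.zip p).map (fun q : Int × Int => if q.1 = q.2 then (1 : Int) else 0)).sum

theorem pvMod_cast (k L : Nat) : PySem.Int.mod (k : Int) (L : Int) = ((k % L : Nat) : Int) := by
  have h : PySem.Int.mod (k : Int) (L : Int) = (k : Int) % (L : Int) := by
    unfold PySem.Int.mod
    rw [Int.fmod_eq_emod]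
    simp
  rw [h]
  omega

theorem pvEnum_sum (p : List Int) : ∀ (xs : List Int) (s : Nat),
    ((PySem.List.enumerate xs (s : Int)).map (pvG p)).sum = pvMSum p xs s := by
  intro xs
  induction xs with
  | nil => intro s; simp [PySem.List.enumerate_nil, pvMSum]
  | cons x t ih =>
    intro s
    rw [PySem.List.enumerate_cons]
    simp only [List.map_cons, List.sum_cons]
    have hc : ((s : Int) + 1) = ((s + 1 : Nat) : Int) := by push_cast; ring
    rw [hc, ih (s + 1)]
    rfl

theorem pvEnum_sum0 (p xs : List Int) :
    ((PySem.List.enumerate xs).map (pvG p)).sum = pvMSum p xs 0 := by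
  have h := pvEnum_sum p xs 0
  simpa using h

theorem pvMSum_shift (p : List Int) : ∀ (ys : List Int) (k : Nat),
    pvMSum p ys (k + p.length) = pvMSum p ys k := by
  intro ys
  induction ys with
  | nil => intro k; rfl
  | cons x t ih =>
    intro k
    show pvG p ((↑(k + p.length) : Int), x) + pvMSum p t (k + p.length + 1)
        = pvG p ((k : Int), x) + pvMSum p t (k + 1)
    have h1 : pvG p ((↑(k + p.length) : Int), x) = pvG p ((k : Int), x) := by
      unfold pvG
      rw [pvMod_cast (k + p.length) p.length, pvMod_cast k p.length, Nat.add_mod_right]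
    have h2 : k + p.length + 1 = (k + 1) + p.length := by omega
    rw [h1, h2, ih (k + 1)]

theorem pvMSum_append (p : List Int) : ∀ (a b : List Int) (k : Nat),
    pvMSum p (a ++ b) k = pvMSum p a k + pvMSum p b (k + a.length) := by
  intro a
  induction a with
  | nil => intro b k; simp [pvMSum]
  | cons x t ih =>
    intro b k
    show pvG p ((k : Int), x) + pvMSum p (t ++ b) (k + 1)
        = (pvG p ((k : Int), x) + pvMSum p t (k + 1)) + pvMSum p b (k + (t.length + 1))
    rw [ih b (k + 1)]
    have h : k + 1 + t.length = k + (t.length + 1) := by omega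
    rw [h, add_assoc]

theorem pvChunk_eq (p : List Int) : ∀ (c : List Int) (k : Nat), c.length + k ≤ p.length →
    ((c.zip (p.drop k)).map (fun q : Int × Int => if q.1 = q.2 then (1 : Int) else 0)).sum
      = pvMSum p c k := by
  intro c
  induction c with
  | nil => intro k _; simp [pvMSum]
  | cons x t ih =>
    intro k hk
    have hkl : k < p.length := by simp at hk; omega
    rw [List.drop_eq_getElem_cons hkl]
    simp only [List.zip_cons_cons, List.map_cons, List.sum_cons]
    rw [ih (k + 1) (by simp at hk ⊢; omega)]
    show _ = pvG p ((k : Int), x) + pvMSum p t (k + 1)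
    have hg : pvG p ((k : Int), x) = if x = p[k] then 1 else 0 := by
      unfold pvG
      rw [pvMod_cast k p.length, Nat.mod_eq_of_lt hkl]
      simp [PySem.List.pyGetD_natCast, List.getElem?_eq_getElem hkl]
    rw [hg]

theorem pvChunks (p : List Int) : ∀ (C : Nat) (xs : List Int), xs.length ≤ p.length * C →
    ((List.range C).map (fun j => pvInner ((xs.drop (p.length * j)).take p.length) p)).sum
      = pvMSum p xs 0 := by
  intro C
  induction C with
  | zero =>
    intro xs h
    have : xs = [] := by
      cases xs with
      | nil => rfl
      | cons a t => simp at h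
    subst this; rfl
  | succ C ih =>
    intro xs h
    rw [List.range_succ_eq_map]
    simp only [List.map_cons, List.sum_cons, List.map_map]
    have hstep : ∀ j : Nat,
        pvInner ((xs.drop (p.length * (j + 1))).take p.length) p
          = pvInner (((xs.drop p.length).drop (p.length * j)).take p.length) p := by
      intro j
      rw [List.drop_drop]
      have harg : p.length + p.length * j = p.length * (j + 1) := by ring
      rw [harg]
    have hmap : ((List.range C).map
          ((fun j => pvInner ((xs.drop (p.length * j)).take p.length) p) ∘ Nat.succ)).sum
        = pvMSum p (xs.drop p.length) 0 := by
      have hlen : (xs.drop p.length).length ≤ p.length * C := by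
        simp only [List.length_drop]
        have := h
        simp only [Nat.mul_succ] at this
        omega
      rw [← ih (xs.drop p.length) hlen]
      congr 1
      apply List.map_congr_left
      intro j _
      simp only [Function.comp_apply]
      exact hstep j
    rw [hmap]
    have hfirst : pvInner ((xs.drop (p.length * 0)).take p.length) p
        = pvMSum p (xs.take p.length) 0 := by
      rw [Nat.mul_zero, List.drop_zero]
      unfold pvInner
      have := pvChunk_eq p (xs.take p.length) 0 (by simp)
      simpa using this
    rw [hfirst]
    by_cases hle : xs.length ≤ p.length
    · rw [List.drop_eq_nil_of_le hle, List.take_of_length_le hle]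
      simp [pvMSum]
    · have hsplit := pvMSum_append p (xs.take p.length) (xs.drop p.length) 0
      rw [List.take_append_drop] at hsplit
      rw [hsplit]
      have hl : (xs.take p.length).length = p.length := by
        simp; omega
      rw [hl]
      have := pvMSum_shift p (xs.drop p.length) 0
      simp only [Nat.zero_add] at this ⊢
      rw [this]

theorem pvScore_eq (answers p : List Int) (hL : 0 < p.length) :
    pvScore answers p = pvMSum p answers 0 := by
  unfold pvScore
  -- inner fold from acc = acc + pvInner chunk p
  have hfun : (fun (acc : Int) (k : Int) =>
      ((PySem.List.slice answers (some k) (some (k + (p.length : Int)))).zip p).foldl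
        (fun a (q : Int × Int) => a + (if q.1 = q.2 then (1 : Int) else 0)) acc)
      = (fun (acc : Int) (k : Int) =>
          acc + pvInner (PySem.List.slice answers (some k) (some (k + (p.length : Int)))) p) := by
    funext acc k
    exact PySem.List.foldl_add
      (l := (PySem.List.slice answers (some k) (some (k + (p.length : Int)))).zip p)
      (a := acc) (g := fun q : Int × Int => if q.1 = q.2 then (1 : Int) else 0)
  rw [hfun]
  rw [PySem.List.foldl_add
    (l := PySem.List.pyRange 0 (answers.length : Int) (p.length : Int)) (a := 0)
    (g := fun k => pvInner (PySem.List.slice answers (some k) (some (k + (p.length : Int)))) p)]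
  rw [PySem.List.pyRange_of_pos 0 (answers.length : Int) (by exact_mod_cast hL)]
  rw [List.map_map]
  set C : Nat := (if (0 : Int) < (answers.length : Int)
      then (((answers.length : Int) - 0 + (p.length : Int) - 1) / (p.length : Int)).toNat
      else 0) with hC
  have hterm : ∀ j : Nat,
      ((fun k => pvInner (PySem.List.slice answers (some k) (some (k + (p.length : Int)))) p) ∘
        (fun k : Nat => (0 : Int) + (p.length : Int) * (k : Int))) j
      = pvInner ((answers.drop (p.length * j)).take p.length) p := by
    intro j
    simp only [Function.comp_apply]
    have h1 : (0 : Int) + (p.length : Int) * (j : Int) = ((p.length * j : Nat) : Int) := by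
      push_cast; ring
    rw [h1, PySem.List.slice_natCast_add]
  have hmap : (List.range C).map
      ((fun k => pvInner (PySem.List.slice answers (some k) (some (k + (p.length : Int)))) p) ∘
        (fun k : Nat => (0 : Int) + (p.length : Int) * (k : Int)))
      = (List.range C).map (fun j => pvInner ((answers.drop (p.length * j)).take p.length) p) := by
    apply List.map_congr_left
    intro j _
    exact hterm j
  rw [hmap, zero_add]
  apply pvChunks
  -- answers.length ≤ p.length * C
  by_cases hn : answers.length = 0
  · simp [hC, hn]
  · have hpos : (0 : Int) < (answers.length : Int) := by exact_mod_cast Nat.pos_of_ne_zero hn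
    rw [hC, if_pos hpos]
    have hcast : ((answers.length : Int) - 0 + (p.length : Int) - 1)
        = ((answers.length + p.length - 1 : Nat) : Int) := by
      push_cast [Nat.cast_sub (by omega : 1 ≤ answers.length + p.length)]
      ring
    rw [hcast]
    have hq0 : 0 ≤ ((answers.length + p.length - 1 : Nat) : Int) / (p.length : Int) :=
      Int.ediv_nonneg (by positivity) (by positivity)
    have hdm := Int.ediv_add_emod ((answers.length + p.length - 1 : Nat) : Int) (p.length : Int)
    have hlt := Int.emod_lt_of_pos ((answers.length + p.length - 1 : Nat) : Int)
      (by exact_mod_cast hL : (0 : Int) < (p.length : Int))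
    have hge := Int.emod_nonneg ((answers.length + p.length - 1 : Nat) : Int)
      (by positivity : ((p.length : Int)) ≠ 0)
    have key : (answers.length : Int) ≤
        ((p.length * (((answers.length + p.length - 1 : Nat) : Int) / (p.length : Int)).toNat : Nat) : Int) := by
      push_cast [Int.toNat_of_nonneg hq0]
      have hlen1 : (1 : Int) ≤ (answers.length : Int) := by exact_mod_cast Nat.pos_of_ne_zero hn
      generalize hm : (p.length : Int) * (((answers.length + p.length - 1 : Nat) : Int) / (p.length : Int)) = m at hdm ⊢
      push_cast at hdm hlt hge ⊢
      omega
    exact_mod_cast key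

-- the triple-counter loop of A computes the three enumerate-indicator sums
theorem pvFold_eq (l : List (Int × Int)) : ∀ (a b c : Int),
    l.foldl
      (fun (s : Int × Int × Int) (q : Int × Int) =>
        let s1 := if q.2 = PySem.List.pyGetD pvPat1 (PySem.Int.mod q.1 5) 0 then s.1 + 1 else s.1
        let s2 := if q.2 = PySem.List.pyGetD pvPat2 (PySem.Int.mod q.1 8) 0 then s.2.1 + 1 else s.2.1
        let s3 := if q.2 = PySem.List.pyGetD pvPat3 (PySem.Int.mod q.1 10) 0 then s.2.2 + 1 else s.2.2
        (s1, s2, s3))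
      (a, b, c)
    = (a + (l.map (pvG pvPat1)).sum, b + (l.map (pvG pvPat2)).sum, c + (l.map (pvG pvPat3)).sum) := by
  induction l with
  | nil => intro a b c; simp
  | cons x t ih =>
    intro a b c
    simp only [List.foldl_cons, List.map_cons, List.sum_cons, ih]
    unfold pvG
    simp only [pvPat1, pvPat2, pvPat3, List.length_cons, List.length_nil]
    norm_num
    split_ifs <;> refine ⟨by ring, by ring, by ring⟩

-- A's 7-branch subset chain equals B's max-and-filter on the 3-element score list
theorem pvChain (a b c : Int) :
    (if max a (max b c) = a ∧ a = b ∧ b = c then [1, 2, 3]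
     else if max a (max b c) = a ∧ a = b then [1, 2]
     else if max a (max b c) = a ∧ a = c then [1, 3]
     else if max a (max b c) = b ∧ b = c then [2, 3]
     else if max a (max b c) = a then [1]
     else if max a (max b c) = b then [2]
     else if max a (max b c) = c then [3]
     else ([] : List Int))
    = ((PySem.List.enumerate [a, b, c]).filter
        (fun q => q.2 = (PySem.List.max? [a, b, c] (fun x => x)).getD 0)).map (fun q => q.1 + 1) := by
  have hx : PySem.List.max? [a, b, c] (fun x => x) = some (max a (max b c)) := by
    rw [PySem.List.max?_id_cons]
    simp [List.foldl, max_assoc]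
  rw [hx]
  have h1 : a ≤ max a (max b c) := le_max_left _ _
  have h2 : b ≤ max a (max b c) := le_trans (le_max_left b c) (le_max_right _ _)
  have h3 : c ≤ max a (max b c) := le_trans (le_max_right b c) (le_max_right _ _)
  have h4 : max a (max b c) = a ∨ max a (max b c) = b ∨ max a (max b c) = c := by
    rcases max_choice a (max b c) with h | h
    · exact Or.inl h
    · rcases max_choice b c with h' | h' <;> rw [h, h'] <;> simp
  generalize max a (max b c) = M at h1 h2 h3 h4 ⊢
  simp only [PySem.List.enumerate, Option.getD_some, List.filter_cons, List.filter_nil,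
    decide_eq_true_eq]
  split_ifs <;> simp only [List.map_cons, List.map_nil] <;>
    first
      | rfl
      | (exfalso; omega)

-- ===== VERDICT (by name: the statement is the Claim_ definition above) =====
theorem solution_spec : Claim_equal_solution := by
  intro answers _
  unfold Spec_solution solution solution_alt
  simp only [pvFold_eq]
  simp only [List.map_cons, List.map_nil, pvEnum_sum0, zero_add]
  simp only [pvScore_eq answers [1, 2, 3, 4, 5] (by decide),
      pvScore_eq answers [2, 1, 2, 3, 2, 4, 2, 5] (by decide),
      pvScore_eq answers [3, 3, 1, 1, 2, 2, 4, 4, 5, 5] (by decide)]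
  simp only [pvPat1, pvPat2, pvPat3]
  exact pvChain _ _ _
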